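-- pv_equiv track=rewrite | github.com/zeunala/ProblemSolving | Programmers/2021.10-2021.12/Lv1_17681.py | solution
-- ===== SOURCE A (Python) =====
-- def numToMap(num, n): # ex. numToMap(9,5)는 " #  #"를 리턴한다.
--     result = ""
--     for i in range(n):
--         if num % 2 == 1:
--             result = "#" + result
--         else:
--             result = " " + result
--         num //= 2
--
--     return result
--
-- def solution(n, arr1, arr2):
--     answer = ["" for i in range(n)]
--
--     map1 = []
--     map2 = []
--
--     for i in range(n):
--         map1.append(numToMap(arr1[i], n))
--         map2.append(numToMap(arr2[i], n))
--
--         for j in range(n):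
--             if map1[i][j] == "#" or map2[i][j] == "#":
--                 answer[i] += "#"
--             else:
--                 answer[i] += " "
--     return answer
-- ===== SOURCE B (Python) =====
-- def solution(n, arr1, arr2):
--     mask = (1 << n) - 1 if n > 0 else 0
--     return [format((arr1[i] | arr2[i]) & mask, '0{}b'.format(n)).replace('1', '#').replace('0', ' ')
--             for i in range(n)]
-- ===== Notes on version B (the rewrite author's own statement) =====
-- stated objective: idiomatic
-- what changed: B replaces A's per-row bit-by-bit string building (numToMap on both rows via repeated string prepending, two intermediate map lists, then an inner per-character OR loop) by a single numeric OR of the two row values masked to n bits, rendered at once as a zero-padded binary string whose digits are mapped to '#'/' '.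
import Mathlib
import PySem

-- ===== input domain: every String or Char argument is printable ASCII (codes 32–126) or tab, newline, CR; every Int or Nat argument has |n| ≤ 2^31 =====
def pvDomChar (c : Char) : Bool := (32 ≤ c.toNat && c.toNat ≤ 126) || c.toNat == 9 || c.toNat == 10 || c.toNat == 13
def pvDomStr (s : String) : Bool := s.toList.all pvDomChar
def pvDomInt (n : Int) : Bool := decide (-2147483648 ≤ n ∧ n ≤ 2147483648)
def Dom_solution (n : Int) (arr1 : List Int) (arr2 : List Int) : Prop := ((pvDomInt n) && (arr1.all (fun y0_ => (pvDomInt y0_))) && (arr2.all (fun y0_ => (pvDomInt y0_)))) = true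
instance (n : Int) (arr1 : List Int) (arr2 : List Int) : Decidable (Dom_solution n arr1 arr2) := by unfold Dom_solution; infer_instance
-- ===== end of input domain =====

-- B renders each row as one masked numeric OR formatted as a zero-padded binary string,
-- instead of A's bit-by-bit construction of two intermediate row maps plus a per-character OR loop (objective: idiomatic).
-- Python strings are modeled as List Char internally and packed with String.ofList at the end.

-- ===== PORT A =====
-- loop of numToMap: 'for i in range(n): result = bitChar + result; num //= 2' (fuel = iteration count)
def numToMapLoop : Nat → Int → List Char → List Char
  | 0, _, result => result
  | k+1, num, result =>
      numToMapLoop k (PySem.Int.floordiv num 2)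
        ((if PySem.Int.mod num 2 = 1 then '#' else ' ') :: result)

def numToMap (num : Int) (n : Int) : List Char := numToMapLoop n.toNat num []

def solution (n : Int) (arr1 : List Int) (arr2 : List Int) : List String :=
  let rng := PySem.List.pyRange 0 n 1
  let st := rng.foldl
    (fun (st : List (List Char) × List (List Char) × List (List Char)) i =>
      let answer := st.1
      -- map1.append(numToMap(arr1[i], n)); map2.append(numToMap(arr2[i], n))  (arr[i]: in range under Pre_)
      let map1 := st.2.1 ++ [numToMap (PySem.List.pyGetD arr1 i 0) n]
      let map2 := st.2.2 ++ [numToMap (PySem.List.pyGetD arr2 i 0) n]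
      let answer := rng.foldl
        (fun (answer : List (List Char)) j =>
          if PySem.List.pyGetD (PySem.List.pyGetD map1 i []) j ' ' = '#'
              ∨ PySem.List.pyGetD (PySem.List.pyGetD map2 i []) j ' ' = '#' then
            answer.set i.toNat (answer.getD i.toNat [] ++ ['#'])
          else
            answer.set i.toNat (answer.getD i.toNat [] ++ [' ']))
        answer
      (answer, map1, map2))
    (rng.map (fun _ => ([] : List Char)), [], [])
  st.1.map (fun cs => String.ofList cs)

-- ===== PORT B =====
-- port of format(v, '0{n}b'): exact for the values Source B feeds it (0 ≤ v < 2^n)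
def binRender : Nat → Int → List Char
  | 0, _ => []
  | k+1, v => binRender k (v / 2) ++ [if v % 2 = 1 then '1' else '0']

def solution_alt (n : Int) (arr1 : List Int) (arr2 : List Int) : List String :=
  let mask : Int := if 0 < n then 2 ^ n.toNat - 1 else 0   -- (1 << n) - 1 if n > 0 else 0
  (PySem.List.pyRange 0 n 1).map (fun i =>
    let v := ((PySem.List.pyGetD arr1 i 0).lor (PySem.List.pyGetD arr2 i 0)).land mask
    String.ofList (((binRender n.toNat v).map (fun c => if c = '1' then '#' else c)).map
      (fun c => if c = '0' then ' ' else c)))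

-- ===== PRECONDITION & SPEC =====
-- Pre_ excludes exactly the inputs where A raises IndexError: arr1[i] / arr2[i] with n exceeding a length.
def Pre_solution (n : Int) (arr1 : List Int) (arr2 : List Int) : Prop :=
  n ≤ (arr1.length : Int) ∧ n ≤ (arr2.length : Int)
instance (n : Int) (arr1 : List Int) (arr2 : List Int) : Decidable (Pre_solution n arr1 arr2) := by
  unfold Pre_solution; infer_instance

def pvWitness_solution : Int × List Int × List Int := (2, [1, 2], [2, 1])

def Spec_solution (n : Int) (arr1 : List Int) (arr2 : List Int) (out : List String) : Prop := out = solution_alt n arr1 arr2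
instance (n : Int) (arr1 : List Int) (arr2 : List Int) (out : List String) : Decidable (Spec_solution n arr1 arr2 out) := by unfold Spec_solution; infer_instance

-- ===== CLAIM (what is proved, stated in full; the proofs are below) =====
def Claim_equal_solution : Prop := ∀ (n : Int) (arr1 : List Int) (arr2 : List Int), Dom_solution n arr1 arr2 → Pre_solution n arr1 arr2 → Spec_solution n arr1 arr2 (solution n arr1 arr2)

-- ===== LEMMAS AND PROOFS =====

-- the pointwise OR on characters performed by A's inner loop
def orChar (c d : Char) : Char := if c = '#' ∨ d = '#' then '#' else ' '

-- A's outer loop body, named so the invariant can speak about it (definitionally the lambda in `solution`)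
def stepA (n : Int) (arr1 arr2 : List Int)
    (st : List (List Char) × List (List Char) × List (List Char)) (i : Int) :
    List (List Char) × List (List Char) × List (List Char) :=
  let answer := st.1
  let map1 := st.2.1 ++ [numToMap (PySem.List.pyGetD arr1 i 0) n]
  let map2 := st.2.2 ++ [numToMap (PySem.List.pyGetD arr2 i 0) n]
  let answer := (PySem.List.pyRange 0 n 1).foldl
    (fun (answer : List (List Char)) j =>
      if PySem.List.pyGetD (PySem.List.pyGetD map1 i []) j ' ' = '#'
          ∨ PySem.List.pyGetD (PySem.List.pyGetD map2 i []) j ' ' = '#' then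
        answer.set i.toNat (answer.getD i.toNat [] ++ ['#'])
      else
        answer.set i.toNat (answer.getD i.toNat [] ++ [' ']))
    answer
  (answer, map1, map2)

theorem solution_unfold (n : Int) (arr1 arr2 : List Int) :
    solution n arr1 arr2 =
      ((PySem.List.pyRange 0 n 1).foldl (stepA n arr1 arr2)
        ((PySem.List.pyRange 0 n 1).map (fun _ => ([] : List Char)), [], [])).1.map
          (fun cs => String.ofList cs) := rfl

theorem numToMapLoop_acc (k : Nat) : ∀ (num : Int) (acc : List Char),
    numToMapLoop k num acc = numToMapLoop k num [] ++ acc := by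
  induction k with
  | zero => intro num acc; simp [numToMapLoop]
  | succ k ih =>
      intro num acc
      simp only [numToMapLoop]
      rw [ih, ih (PySem.Int.floordiv num 2) [_]]
      simp

theorem numToMapLoop_succ (k : Nat) (num : Int) :
    numToMapLoop (k+1) num [] =
      numToMapLoop k (PySem.Int.floordiv num 2) [] ++ [if PySem.Int.mod num 2 = 1 then '#' else ' '] := by
  simp only [numToMapLoop]; rw [numToMapLoop_acc]

theorem length_numToMapLoop (k : Nat) : ∀ num : Int, (numToMapLoop k num []).length = k := by
  induction k with
  | zero => intro num; rfl
  | succ k ih => intro num; rw [numToMapLoop_succ]; simp [ih]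

theorem floordiv_two_eq_div2 (a : Int) : PySem.Int.floordiv a 2 = a.div2 := by
  rw [PySem.Int.floordiv_eq_iff_of_pos (by norm_num)]
  have h := Int.bit_decomp a
  cases hb : a.bodd <;> rw [hb] at h <;> simp only [Int.bit, cond] at h <;> omega

theorem mod_two_eq_one_iff_bodd (a : Int) : PySem.Int.mod a 2 = 1 ↔ a.bodd = true := by
  rw [PySem.Int.mod_eq_emod_of_pos (by norm_num)]
  have h := Int.bit_decomp a
  cases hb : a.bodd <;> rw [hb] at h <;> simp only [Int.bit, cond] at h <;> simp <;> omega

theorem lor_bit_decomp (a b : Int) :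
    a.lor b = Int.bit (a.bodd || b.bodd) (a.div2.lor b.div2) := by
  conv_lhs => rw [← Int.bit_decomp a]
  conv_lhs => rw [← Int.bit_decomp b]
  rw [Int.lor_bit]

theorem bodd_lor (a b : Int) : (a.lor b).bodd = (a.bodd || b.bodd) := by
  rw [lor_bit_decomp, Int.bodd_bit]

theorem div2_lor (a b : Int) : (a.lor b).div2 = a.div2.lor b.div2 := by
  rw [lor_bit_decomp, Int.div2_bit]

theorem land_nonneg_of_right (w : Int) (t : Int) (ht : 0 ≤ t) : 0 ≤ w.land t := by
  obtain ⟨m, rfl⟩ := Int.eq_ofNat_of_zero_le ht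
  cases w with
  | ofNat k => simp [Int.land]
  | negSucc k => simp [Int.land]

theorem mask_succ (m : Nat) : (2 ^ (m+1) - 1 : Int) = Int.bit true (2 ^ m - 1) := by
  simp [Int.bit, pow_succ]; ring

theorem land_mask_succ (w : Int) (m : Nat) :
    w.land (2 ^ (m+1) - 1) = Int.bit w.bodd (w.div2.land (2 ^ m - 1)) := by
  conv_lhs => rw [← Int.bit_decomp w]
  conv_lhs => rw [mask_succ]
  rw [Int.land_bit]
  simp

theorem mask_nonneg (m : Nat) : (0 : Int) ≤ 2 ^ m - 1 := by
  have : (0 : Int) < 2 ^ m := by positivity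
  omega

-- the core per-row fact: the character-wise OR of A's two bit strings is
-- B's rendering of the masked numeric OR
theorem core (m : Nat) : ∀ a b : Int,
    List.zipWith orChar (numToMapLoop m a []) (numToMapLoop m b []) =
      ((binRender m ((a.lor b).land (2 ^ m - 1))).map (fun c => if c = '1' then '#' else c)).map
        (fun c => if c = '0' then ' ' else c) := by
  induction m with
  | zero => intro a b; rfl
  | succ m ih =>
      intro a b
      rw [numToMapLoop_succ, numToMapLoop_succ,
        List.zipWith_append (by rw [length_numToMapLoop, length_numToMapLoop])]
      have hbit := land_mask_succ (a.lor b) m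
      have ht : 0 ≤ (a.lor b).div2.land (2 ^ m - 1) := land_nonneg_of_right _ _ (mask_nonneg m)
      have hdiv : ((a.lor b).land (2 ^ (m+1) - 1)) / 2 = (a.lor b).div2.land (2 ^ m - 1) := by
        rw [hbit]; cases hb : (a.lor b).bodd <;> simp only [Int.bit, cond] <;> omega
      have hmod : (((a.lor b).land (2 ^ (m+1) - 1)) % 2 = 1) ↔ (a.lor b).bodd = true := by
        rw [hbit]; cases hb : (a.lor b).bodd <;> simp only [Int.bit, cond] <;> simp

      simp only [binRender]
      rw [hdiv, div2_lor, ← floordiv_two_eq_div2, ← floordiv_two_eq_div2,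
        List.map_append, List.map_append, ← ih]
      congr 1
      have hb2 : (((a.lor b).land (2 ^ (m+1) - 1)) % 2 = 1) ↔ (a.bodd = true ∨ b.bodd = true) := by
        rw [hmod, bodd_lor]; simp
      have e1 : (PySem.Int.mod a 2 = 1) = (a.bodd = true) := propext (mod_two_eq_one_iff_bodd a)
      have e2 : (PySem.Int.mod b 2 = 1) = (b.bodd = true) := propext (mod_two_eq_one_iff_bodd b)
      have e3 : (((a.lor b).land (2 ^ (m+1) - 1)) % 2 = 1) = (a.bodd = true ∨ b.bodd = true) :=
        propext hb2
      simp only [e1, e2, e3]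
      by_cases ha : a.bodd = true <;> by_cases hbb : b.bodd = true <;> simp [ha, hbb, orChar]

-- generic form of A's inner loop: appending one character per j to slot i
theorem inner_fold {js : List Int} (g : Int → Char) :
    ∀ (answer : List (List Char)) (i : Nat),
      js.foldl (fun ans j => ans.set i (ans.getD i [] ++ [g j])) answer
        = answer.set i (answer.getD i [] ++ js.map g) := by
  induction js with
  | nil =>
      intro answer i
      by_cases h : i < answer.length
      · simp [List.getD_eq_getElem?_getD, List.getElem?_eq_getElem h]
      · simp [List.set_eq_of_length_le (le_of_not_gt h)]
  | cons j js ih =>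
      intro answer i
      simp only [List.foldl_cons, List.map_cons]
      rw [ih]
      by_cases h : i < answer.length
      · rw [List.set_set, List.getD_eq_getElem?_getD, List.getElem?_set_self (by simpa using h)]
        simp [List.append_assoc]
      · have h' : answer.length ≤ i := le_of_not_gt h
        simp [List.set_eq_of_length_le, h']

theorem set_append_of_len {α : Type} (A B : List α) (v : α) (k : Nat) (h : A.length = k) :
    (A ++ B).set k v = A ++ B.set 0 v := by
  subst h
  induction A with
  | nil => rfl
  | cons x A ih => simp [ih]

theorem getD_append_of_len {α : Type} (A B : List α) (d : α) (k : Nat) (h : A.length = k) :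
    (A ++ B).getD k d = B.getD 0 d := by
  subst h
  induction A with
  | nil => rfl
  | cons x A ih => simpa using ih

theorem getD_append_len {α : Type} (A B : List α) (d : α) :
    (A ++ B).getD A.length d = B.getD 0 d := by
  induction A with
  | nil => rfl
  | cons x A ih => simpa using ih

theorem length_numToMap (a n : Int) : (numToMap a n).length = n.toNat :=
  length_numToMapLoop n.toNat a

-- A's per-row inner map over the range is the zipWith of the two full rows
theorem range_map_ite (n : Int) (xs ys : List Char)
    (hx : xs.length = n.toNat) (hy : ys.length = n.toNat) :
    (PySem.List.pyRange 0 n 1).map (fun j =>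
        if PySem.List.pyGetD xs j ' ' = '#' ∨ PySem.List.pyGetD ys j ' ' = '#' then '#' else ' ')
      = List.zipWith orChar xs ys := by
  apply List.ext_getElem
  · simp [PySem.List.length_pyRange_one, hx, hy]
  · intro t h1 h2
    have ht : t < n.toNat := by simpa [PySem.List.length_pyRange_one] using h1
    rw [List.getElem_map, PySem.List.getElem_pyRange_one, List.getElem_zipWith]
    have hxt : PySem.List.pyGetD xs (0 + (t : Int)) ' ' = xs[t] := by
      rw [zero_add, PySem.List.pyGetD_natCast, List.getD_eq_getElem?_getD,
        List.getElem?_eq_getElem (by omega), Option.getD_some]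
    have hyt : PySem.List.pyGetD ys (0 + (t : Int)) ' ' = ys[t] := by
      rw [zero_add, PySem.List.pyGetD_natCast, List.getD_eq_getElem?_getD,
        List.getElem?_eq_getElem (by omega), Option.getD_some]
    rw [hxt, hyt]; rfl

def rowChars (n : Int) (arr1 arr2 : List Int) (i : Int) : List Char :=
  List.zipWith orChar (numToMap (PySem.List.pyGetD arr1 i 0) n) (numToMap (PySem.List.pyGetD arr2 i 0) n)

theorem stepA_eq (n : Int) (arr1 arr2 : List Int) (A M1 M2 : List (List Char)) (k : Nat)
    (h1 : M1.length = k) (h2 : M2.length = k) :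
    stepA n arr1 arr2 (A, M1, M2) (k : Int) =
      (A.set k (A.getD k [] ++ rowChars n arr1 arr2 (k : Int)),
       M1 ++ [numToMap (PySem.List.pyGetD arr1 (k : Int) 0) n],
       M2 ++ [numToMap (PySem.List.pyGetD arr2 (k : Int) 0) n]) := by
  have hx1 : PySem.List.pyGetD (M1 ++ [numToMap (PySem.List.pyGetD arr1 (k : Int) 0) n]) (k : Int) []
      = numToMap (PySem.List.pyGetD arr1 (k : Int) 0) n := by
    rw [PySem.List.pyGetD_natCast, ← h1, getD_append_len]; rfl
  have hx2 : PySem.List.pyGetD (M2 ++ [numToMap (PySem.List.pyGetD arr2 (k : Int) 0) n]) (k : Int) []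
      = numToMap (PySem.List.pyGetD arr2 (k : Int) 0) n := by
    rw [PySem.List.pyGetD_natCast, ← h2, getD_append_len]; rfl
  simp only [stepA]
  refine Prod.ext ?_ rfl
  simp only [hx1, hx2, Int.toNat_natCast]
  have hlam : (fun (ans : List (List Char)) (j : Int) =>
        if PySem.List.pyGetD (numToMap (PySem.List.pyGetD arr1 (k : Int) 0) n) j ' ' = '#'
            ∨ PySem.List.pyGetD (numToMap (PySem.List.pyGetD arr2 (k : Int) 0) n) j ' ' = '#' then
          ans.set k (ans.getD k [] ++ ['#'])
        else
          ans.set k (ans.getD k [] ++ [' ']))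
      = (fun (ans : List (List Char)) (j : Int) =>
          ans.set k (ans.getD k [] ++
            [if PySem.List.pyGetD (numToMap (PySem.List.pyGetD arr1 (k : Int) 0) n) j ' ' = '#'
                ∨ PySem.List.pyGetD (numToMap (PySem.List.pyGetD arr2 (k : Int) 0) n) j ' ' = '#' then
              '#' else ' '])) := by
    funext ans j; split_ifs <;> rfl
  rw [hlam, inner_fold]
  rw [range_map_ite n (numToMap (PySem.List.pyGetD arr1 (k : Int) 0) n)
      (numToMap (PySem.List.pyGetD arr2 (k : Int) 0) n) (length_numToMap _ _) (length_numToMap _ _)]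
  rfl

theorem outer_inv (n : Int) (arr1 arr2 : List Int) :
    ∀ k : Nat, k ≤ n.toNat →
      ((List.map (fun (j : Nat) => (j : Int)) (List.range k)).foldl (stepA n arr1 arr2)
          (List.replicate n.toNat ([] : List Char), [], []))
        = (List.map (fun (i : Nat) => rowChars n arr1 arr2 (i : Int)) (List.range k)
              ++ List.replicate (n.toNat - k) ([] : List Char),
           List.map (fun (i : Nat) => numToMap (PySem.List.pyGetD arr1 (i : Int) 0) n) (List.range k),
           List.map (fun (i : Nat) => numToMap (PySem.List.pyGetD arr2 (i : Int) 0) n) (List.range k)) := by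
  intro k
  induction k with
  | zero => intro _; simp
  | succ k ih =>
      intro hk1
      have hk : k < n.toNat := hk1
      rw [List.range_succ, List.map_append, List.foldl_append, ih (le_of_lt hk)]
      simp only [List.map_cons, List.map_nil, List.foldl_cons, List.foldl_nil]
      rw [stepA_eq n arr1 arr2 _ _ _ k (by simp) (by simp)]
      obtain ⟨r, hr⟩ : ∃ r, n.toNat - k = r + 1 := ⟨n.toNat - (k + 1), by omega⟩
      have hlen : (List.map (fun (i : Nat) => rowChars n arr1 arr2 (i : Int)) (List.range k)).length = k := by
        simp
      simp only [List.map_append, List.map_cons, List.map_nil, Prod.mk.injEq]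
      refine ⟨?_, trivial⟩
      rw [hr, List.replicate_succ,
        getD_append_of_len _ _ _ _ hlen, set_append_of_len _ _ _ _ hlen]
      simp only [List.getD_cons_zero, List.set_cons_zero, List.nil_append]
      have hrr : n.toNat - (k + 1) = r := by omega
      rw [hrr, List.append_assoc]
      rfl

theorem pyRange_zero_n (n : Int) :
    PySem.List.pyRange 0 n 1 = List.map (fun (j : Nat) => (j : Int)) (List.range n.toNat) := by
  rw [PySem.List.pyRange_one]
  simp

theorem solutionA_char (n : Int) (arr1 arr2 : List Int) :
    solution n arr1 arr2 =
      (List.map (fun (i : Nat) => rowChars n arr1 arr2 (i : Int)) (List.range n.toNat)).map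
        (fun cs => String.ofList cs) := by
  rw [solution_unfold]
  have hinit : (PySem.List.pyRange 0 n 1).map (fun _ => ([] : List Char))
      = List.replicate n.toNat ([] : List Char) := by
    rw [List.map_const', PySem.List.length_pyRange_one]
    norm_num
  rw [hinit, pyRange_zero_n, outer_inv n arr1 arr2 n.toNat (le_refl _)]
  simp

-- ===== VERDICT (by name: the statement is the Claim_ definition above) =====
theorem solution_spec : Claim_equal_solution := by
  intro n arr1 arr2 _ _
  unfold Spec_solution
  rw [solutionA_char]
  by_cases h' : n ≤ 0
  case pos =>
    have h0 : n.toNat = 0 := Int.toNat_of_nonpos h'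
    simp only [solution_alt]
    rw [PySem.List.pyRange_one_eq_nil (by omega)]
    simp [h0]
  case neg =>
    have h : 0 < n := by omega
    simp only [solution_alt]
    rw [if_pos h, pyRange_zero_n, List.map_map, List.map_map]
    apply List.map_congr_left
    intro i _
    show String.ofList (rowChars n arr1 arr2 (i : Int)) = _
    simp only [Function.comp]
    congr 1
    exact core n.toNat (PySem.List.pyGetD arr1 (i : Int) 0) (PySem.List.pyGetD arr2 (i : Int) 0)
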